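-- pv_equiv track=rewrite | github.com/AlexMontgomerie/fpgaconvnet-optimiser | fpgaconvnet_optimiser/tools/hls_helper.py | stream_rsc
-- ===== SOURCE A (Python) =====
-- import math
--
-- def bram18k_depth(data_width):
--     if data_width == 1:
--         return 16384
--     elif data_width == 2:
--         return 8192
--     elif data_width <= 4:
--         return 4096
--     elif data_width <= 9:
--         return 2048
--     elif data_width <= 18:
--         return 1024
--     elif data_width <= 36:
--         return 512
--     else:
--         assert False, "Unreachable"
--
-- def stream_rsc(data_width, buffer_depth, resource_type=None):
--     if data_width*buffer_depth > 1024: # hls use 512, vivado use 1024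
--         resource_type = "BRAM"
--
--     stream_bram = 0
--     if resource_type == "BRAM":
--         max_bram_depth = bram18k_depth(min(data_width,36)) # hls use 18, vivado use 36
--         stream_bram = math.ceil(data_width/36) # hls use 18, vivado use 36
--
--         # this while loop is based on hls behaviour, vivado may decide to use more BRAMs to avoid large multiplexer
--         while buffer_depth > max_bram_depth:
--             buffer_depth = math.ceil(buffer_depth/2)
--             stream_bram = int(stream_bram*2)
--
--     return {
--         "LUT"  : 0,
--         "BRAM" : stream_bram,
--         "DSP"  : 0,
--         "FF"   : 0,
--     }
-- ===== SOURCE B (Python) =====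
-- def _max_depth(w):
--     # same depth table as the original, written as a range scan
--     if 1 <= w <= 2:
--         return 16384 >> (w - 1)
--     for bound, depth in ((4, 4096), (9, 2048), (18, 1024)):
--         if w <= bound:
--             return depth
--     return 512
--
-- def stream_rsc(data_width, buffer_depth, resource_type=None):
--     if data_width * buffer_depth > 1024:  # hls use 512, vivado use 1024
--         resource_type = "BRAM"
--     stream_bram = 0
--     if resource_type == "BRAM":
--         max_depth = _max_depth(min(data_width, 36))
--         stream_bram = -(-data_width // 36)  # ceil(data_width/36), integer arithmetic
--         if buffer_depth > max_depth:
--             # closed form for the halving loop: smallest k with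
--             # ceil(buffer_depth / 2**k) <= max_depth multiplies stream_bram by 2**k
--             q = -(-buffer_depth // max_depth)
--             stream_bram *= 2 ** (q - 1).bit_length()
--     return {
--         "LUT"  : 0,
--         "BRAM" : stream_bram,
--         "DSP"  : 0,
--         "FF"   : 0,
--     }
-- ===== Notes on version B (the rewrite author's own statement) =====
-- stated objective: simpler
-- what changed: Replaced the while loop that repeatedly halves buffer_depth and doubles stream_bram with a closed-form computation: q = ceil(buffer_depth/max_depth) and stream_bram *= 2**(q-1).bit_length(), using exact integer ceiling division and bit arithmetic; the depth table is kept but written as a shift plus a range scan.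
import Mathlib
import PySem

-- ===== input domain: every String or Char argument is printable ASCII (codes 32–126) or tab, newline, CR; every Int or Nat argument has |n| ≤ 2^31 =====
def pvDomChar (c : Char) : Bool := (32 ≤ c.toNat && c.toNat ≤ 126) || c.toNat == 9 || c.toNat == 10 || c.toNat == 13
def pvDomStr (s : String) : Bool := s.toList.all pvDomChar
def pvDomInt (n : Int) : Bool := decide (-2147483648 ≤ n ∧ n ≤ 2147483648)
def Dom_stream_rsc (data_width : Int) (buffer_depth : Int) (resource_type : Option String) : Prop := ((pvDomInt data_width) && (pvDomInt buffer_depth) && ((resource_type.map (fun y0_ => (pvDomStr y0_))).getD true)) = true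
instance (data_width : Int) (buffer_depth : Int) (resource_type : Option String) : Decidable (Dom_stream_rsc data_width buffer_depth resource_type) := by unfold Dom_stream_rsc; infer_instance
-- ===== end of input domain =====

-- B replaces A's BRAM-halving while loop by a closed-form ceiling-division / bit-length computation (simpler, no loop).


-- ===== PORT A =====
def bram18k_depth (data_width : Int) : Int :=
  if data_width == 1 then 16384
  else if data_width == 2 then 8192
  else if data_width ≤ 4 then 4096
  else if data_width ≤ 9 then 2048
  else if data_width ≤ 18 then 1024
  else if data_width ≤ 36 then 512
  else 0  -- 'assert False, "Unreachable"': the only call site caps data_width at 36, so never reached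

-- the while loop; fuel = buffer_depth.toNat + 1 is always enough because buffer_depth strictly
-- decreases each iteration (max_bram_depth ≥ 512 at the call site).
-- math.ceil(buffer_depth/2) on an int equals floor((buffer_depth+1)/2), ported exactly.
def streamLoopA (maxd : Int) : Nat → Int → Int → Int
  | 0, _, sb => sb
  | fuel+1, bd, sb =>
    if maxd < bd then streamLoopA maxd fuel (PySem.Int.floordiv (bd + 1) 2) (sb * 2)
    else sb

def stream_rsc (data_width : Int) (buffer_depth : Int) (resource_type : Option String) : List (String × Int) :=
  let resource_type := if data_width * buffer_depth > 1024 then some "BRAM" else resource_type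
  let stream_bram : Int :=
    if resource_type == some "BRAM" then
      let max_bram_depth := bram18k_depth (min data_width 36)
      -- math.ceil(data_width/36) on an int is exact as -((-data_width) // 36) (|data_width| ≤ 2^31 ≪ 2^53)
      let sb := -(PySem.Int.floordiv (-data_width) 36)
      streamLoopA max_bram_depth (buffer_depth.toNat + 1) buffer_depth sb
    else 0
  [("LUT", 0), ("BRAM", stream_bram), ("DSP", 0), ("FF", 0)]

-- ===== PORT B =====
def pvMaxDepthB (w : Int) : Int :=
  if 1 ≤ w ∧ w ≤ 2 then PySem.Int.floordiv 16384 (2 ^ (w - 1).toNat)  -- 16384 >> (w-1), w ∈ {1,2}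
  else
    match [((4 : Int), (4096 : Int)), (9, 2048), (18, 1024)].find? (fun p => decide (w ≤ p.1)) with
    | some p => p.2
    | none => 512

def stream_rsc_alt (data_width : Int) (buffer_depth : Int) (resource_type : Option String) : List (String × Int) :=
  let resource_type := if data_width * buffer_depth > 1024 then some "BRAM" else resource_type
  let stream_bram : Int :=
    if resource_type == some "BRAM" then
      let max_depth := pvMaxDepthB (min data_width 36)
      let sb := -(PySem.Int.floordiv (-data_width) 36)  -- ceil(data_width/36)
      if max_depth < buffer_depth then
        let q := -(PySem.Int.floordiv (-buffer_depth) max_depth)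
        sb * 2 ^ PySem.Int.bitLength (q - 1)  -- (q-1).bit_length(); q ≥ 2 here
      else sb
    else 0
  [("LUT", 0), ("BRAM", stream_bram), ("DSP", 0), ("FF", 0)]

-- ===== PRECONDITION & SPEC =====
def Spec_stream_rsc (data_width : Int) (buffer_depth : Int) (resource_type : Option String) (out : List (String × Int)) : Prop := out = stream_rsc_alt data_width buffer_depth resource_type
instance (data_width : Int) (buffer_depth : Int) (resource_type : Option String) (out : List (String × Int)) : Decidable (Spec_stream_rsc data_width buffer_depth resource_type out) := by unfold Spec_stream_rsc; infer_instance

-- ===== CLAIM (what is proved, stated in full; the proofs are below) =====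
def Claim_equal_stream_rsc : Prop := ∀ (data_width : Int) (buffer_depth : Int) (resource_type : Option String), Dom_stream_rsc data_width buffer_depth resource_type → Spec_stream_rsc data_width buffer_depth resource_type (stream_rsc data_width buffer_depth resource_type)

-- ===== LEMMAS AND PROOFS =====

-- the two depth tables agree (on w ≤ 36, the only reachable inputs), and the depth is ≥ 512
theorem maxDepthB_eq (w : Int) (hw : w ≤ 36) :
    pvMaxDepthB w = bram18k_depth w ∧ 512 ≤ bram18k_depth w := by
  unfold pvMaxDepthB bram18k_depth
  by_cases h1 : w = 1
  · subst h1; decide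
  by_cases h2 : w = 2
  · subst h2; decide
  have hno : ¬ (1 ≤ w ∧ w ≤ 2) := by omega
  simp only [hno, if_false, List.find?]
  by_cases h4 : w ≤ 4
  · simp [h1, h2, h4, show decide (w ≤ 4) = true from by simpa using h4]
  by_cases h9 : w ≤ 9
  · simp [h1, h2, h4, h9, show decide (w ≤ 4) = false from by simpa using h4,
      show decide (w ≤ 9) = true from by simpa using h9]
  by_cases h18 : w ≤ 18
  · simp [h1, h2, h4, h9, h18, show decide (w ≤ 4) = false from by simpa using h4,
      show decide (w ≤ 9) = false from by simpa using h9,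
      show decide (w ≤ 18) = true from by simpa using h18]
  · simp [h1, h2, h4, h9, h18, hw, show decide (w ≤ 4) = false from by simpa using h4,
      show decide (w ≤ 9) = false from by simpa using h9]

-- A's halving loop equals B's closed form
theorem loop_closed (maxd : Int) (hm : 1 ≤ maxd) :
    ∀ (fuel : Nat) (bd sb : Int), bd.toNat < fuel →
    streamLoopA maxd fuel bd sb =
      if maxd < bd then
        sb * 2 ^ PySem.Int.bitLength (-(PySem.Int.floordiv (-bd) maxd) - 1)
      else sb := by
  intro fuel
  induction fuel with
  | zero => intro bd sb h; omega
  | succ n ih =>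
    intro bd sb hf
    by_cases hbd : maxd < bd
    · have hbd2 : 2 ≤ bd := by omega
      -- the new buffer depth
      set bd' : Int := PySem.Int.floordiv (bd + 1) 2 with hbd'def
      have hhalf : 2 * bd' - 1 ≤ bd ∧ bd ≤ 2 * bd' := by
        rw [hbd'def, PySem.Int.floordiv_eq_ediv_of_pos (by omega)]; omega
      have hf' : bd'.toNat < n := by omega
      rw [streamLoopA, if_pos hbd, ih bd' (sb * 2) hf', if_pos hbd]
      -- ceiling-division bounds for q = ceil(bd / maxd)
      set q : Int := -(PySem.Int.floordiv (-bd) maxd) with hq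
      have hqb : (q - 1) * maxd < bd ∧ bd ≤ q * maxd :=
        (PySem.Int.neg_floordiv_neg_eq_iff_of_pos (by omega)).1 hq.symm
      have hq2 : 2 ≤ q := by nlinarith [hqb.1, hqb.2]
      by_cases hbd'' : maxd < bd'
      · -- loop continues: bitLength (q-1) = bitLength (q'-1) + 1
        set q' : Int := -(PySem.Int.floordiv (-bd') maxd) with hq'
        have hq'b : (q' - 1) * maxd < bd' ∧ bd' ≤ q' * maxd :=
          (PySem.Int.neg_floordiv_neg_eq_iff_of_pos (by omega)).1 hq'.symm
        -- c := ceil(q/2); show q' = c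
        set c : Int := PySem.Int.floordiv (q + 1) 2 with hc
        have hcb : 2 * c - 1 ≤ q ∧ q ≤ 2 * c := by
          rw [hc, PySem.Int.floordiv_eq_ediv_of_pos (by omega)]; omega
        have hq'c : q' = c := by
          rw [hq']
          rw [PySem.Int.neg_floordiv_neg_eq_iff_of_pos (by omega)]
          constructor
          · nlinarith [hqb.1, hhalf.2, hcb.1]
          · nlinarith [hqb.2, hhalf.1, hcb.2]
        have hq3 : 3 ≤ q := by nlinarith [hq'b.2, hhalf.1]
        have hfd : PySem.Int.floordiv (q - 1) 2 = q' - 1 := by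
          rw [hq'c, hc, PySem.Int.floordiv_eq_ediv_of_pos (by omega),
            PySem.Int.floordiv_eq_ediv_of_pos (by omega)]
          omega
        rw [PySem.Int.bitLength_of_pos (show (0:Int) < q - 1 by omega), hfd]
        rw [if_pos hbd'']
        ring
      · -- loop stops after this step: q = 2
        have hq2' : q = 2 := by
          have : bd ≤ 2 * maxd := by nlinarith [hhalf.2]
          rw [hq, PySem.Int.neg_floordiv_neg_eq_iff_of_pos (by omega)]
          constructor <;> nlinarith
        rw [if_neg hbd'', hq2', show PySem.Int.bitLength (2 - 1 : Int) = 1 from by decide]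
        ring
    · rw [streamLoopA, if_neg hbd, if_neg hbd]

-- ===== VERDICT (by name: the statement is the Claim_ definition above) =====
theorem stream_rsc_spec : Claim_equal_stream_rsc := by
  intro dw bd rt _
  unfold Spec_stream_rsc stream_rsc stream_rsc_alt
  simp only []
  by_cases hrt : (if dw * bd > 1024 then some "BRAM" else rt) == some "BRAM"
  · rw [if_pos hrt, if_pos hrt]
    obtain ⟨heq, hge⟩ := maxDepthB_eq (min dw 36) (by omega)
    rw [heq]
    rw [loop_closed (bram18k_depth (min dw 36)) (by omega) (bd.toNat + 1) bd _ (by omega)]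
  · rw [if_neg hrt, if_neg hrt]
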